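-- pv_equiv track=rewrite | github.com/murphybread/Coding-Test | Algorithm/Sort/K번째수.py | solution
-- ===== SOURCE A (Python) =====
-- def solution(array, commands):
--     answer = []
--
--     # 2차원 배열에서 각 원소는 1차원배열
--     for part in commands:
--
--
--         # i부터 j까지의 부분집합
--
--         i,j,k = part[0], part[1], part[2]
--         partial = array[i-1:j]
--
--         # 정렬
--         partial.sort()
--
--
--         # 해당 부분집합에서k 번째
--         answer.append(partial[k-1])
--
--
--
--
--     return answer
-- ===== SOURCE B (Python) =====
-- def solution(array, commands):
--     # selection by repeated minimum-removal instead of full sort + index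
--     answer = []
--     for part in commands:
--         i, j, k = part[0], part[1], part[2]
--         pool = array[i-1:j]
--         for _ in range(k - 1):
--             pool.remove(min(pool))
--         answer.append(min(pool))
--     return answer
-- ===== Notes on version B (the rewrite author's own statement) =====
-- stated objective: alternative
-- what changed: Instead of fully sorting each slice and indexing at k-1, B finds the k-th smallest by partial selection: it removes the minimum from the slice k-1 times and returns the remaining minimum, so no ordering of the whole slice is ever built.
-- outside the precondition, e.g. on solution([5, 1, 3], [[1, 3, 0]]): A returns [5], B returns [1]
import Mathlib
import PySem

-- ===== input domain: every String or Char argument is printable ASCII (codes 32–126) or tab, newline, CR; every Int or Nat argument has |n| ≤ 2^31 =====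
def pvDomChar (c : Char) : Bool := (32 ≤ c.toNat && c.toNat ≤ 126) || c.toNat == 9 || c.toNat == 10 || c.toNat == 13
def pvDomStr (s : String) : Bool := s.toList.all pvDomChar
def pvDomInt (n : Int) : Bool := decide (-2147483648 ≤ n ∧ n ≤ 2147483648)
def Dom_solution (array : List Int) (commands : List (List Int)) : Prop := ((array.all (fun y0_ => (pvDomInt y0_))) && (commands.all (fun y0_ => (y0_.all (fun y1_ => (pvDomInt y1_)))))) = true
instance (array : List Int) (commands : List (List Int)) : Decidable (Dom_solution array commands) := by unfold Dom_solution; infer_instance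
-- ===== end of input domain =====

-- B replaces the full sort of each slice by repeated minimum-removal selection (alternative algorithm, not faster).

-- ===== PORT A =====
-- literal port of A: for each command, take array[i-1:j], sort it, append its (k-1)-th element
def solution (array : List Int) (commands : List (List Int)) : List Int :=
  commands.foldl (fun answer part =>
    let i := PySem.List.pyGetD part 0 0
    let j := PySem.List.pyGetD part 1 0
    let k := PySem.List.pyGetD part 2 0
    let partial_ := PySem.List.slice array (some (i - 1)) (some j)
    let sortedP := PySem.List.sorted partial_ (fun x => x) false
    answer ++ [PySem.List.pyGetD sortedP (k - 1) 0]) []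

-- ===== PORT B =====
-- port of Source B's inner loop: remove the minimum n times, then return the minimum
def selectLoop : List Int → Nat → Int
  | pool, 0 => (PySem.List.min? pool (fun x => x)).getD 0
  | pool, n + 1 =>
      selectLoop ((PySem.List.remove? pool ((PySem.List.min? pool (fun x => x)).getD 0)).getD pool) n

def solution_alt (array : List Int) (commands : List (List Int)) : List Int :=
  commands.foldl (fun answer part =>
    let i := PySem.List.pyGetD part 0 0
    let j := PySem.List.pyGetD part 1 0
    let k := PySem.List.pyGetD part 2 0
    let pool := PySem.List.slice array (some (i - 1)) (some j)
    answer ++ [selectLoop pool (k - 1).toNat]) []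

-- ===== PRECONDITION & SPEC =====
-- Pre_ excludes commands that raise in A (fewer than 3 entries, or k-1 outside the slice's index
-- range) and commands with k ≤ 0, where A's negative-index wraparound value and B's minimum are
-- both accidental answers to a query no statement of the task specifies.
def Pre_solution (array : List Int) (commands : List (List Int)) : Prop :=
  ∀ c ∈ commands, 3 ≤ c.length ∧
    1 ≤ PySem.List.pyGetD c 2 0 ∧
    PySem.List.pyGetD c 2 0 ≤
      ((PySem.List.slice array (some (PySem.List.pyGetD c 0 0 - 1))
        (some (PySem.List.pyGetD c 1 0))).length : Int)
instance (array : List Int) (commands : List (List Int)) : Decidable (Pre_solution array commands) := by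
  unfold Pre_solution; infer_instance
def pvWitness_solution : List Int × List (List Int) := ([3, 1, 2], [[1, 3, 2]])

def Spec_solution (array : List Int) (commands : List (List Int)) (out : List Int) : Prop := out = solution_alt array commands
instance (array : List Int) (commands : List (List Int)) (out : List Int) : Decidable (Spec_solution array commands out) := by unfold Spec_solution; infer_instance

-- ===== CLAIM (what is proved, stated in full; the proofs are below) =====
def Claim_equal_solution : Prop := ∀ (array : List Int) (commands : List (List Int)), Dom_solution array commands → Pre_solution array commands → Spec_solution array commands (solution array commands)

-- ===== LEMMAS AND PROOFS =====

-- sorting a nonempty list puts its minimum first and sorts the rest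
lemma sorted_min_cons (pool : List Int) (h : pool ≠ []) :
    PySem.List.sorted pool (fun x => x) false =
      ((PySem.List.min? pool (fun x => x)).getD 0) ::
        PySem.List.sorted (pool.erase ((PySem.List.min? pool (fun x => x)).getD 0)) (fun x => x) false := by
  obtain ⟨m, hm⟩ : ∃ m, PySem.List.min? pool (fun x => x) = some m := by
    cases hmin : PySem.List.min? pool (fun x => x) with
    | none => exact absurd ((PySem.List.min?_eq_none_iff _ _).mp hmin) h
    | some m => exact ⟨m, rfl⟩
  have hmem : m ∈ pool := PySem.List.min?_mem hm
  rw [hm]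
  simp only [Option.getD_some]
  refine PySem.List.sorted_id_eq_of_perm_of_pairwise _ _ ?_ ?_
  · exact ((PySem.List.sorted_perm _ _ _).cons m).trans (List.perm_cons_erase hmem).symm
  · refine List.Pairwise.cons ?_ ?_
    · intro y hy
      have hy' : y ∈ pool := List.mem_of_mem_erase ((PySem.List.mem_sorted _ _ _ _).mp hy)
      exact PySem.List.min?_isMin hm y hy'
    · exact PySem.List.sorted_pairwise _ _

lemma selectLoop_eq (n : Nat) : ∀ pool : List Int, n < pool.length →
    selectLoop pool n = (PySem.List.sorted pool (fun x => x) false).getD n 0 := by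
  induction n with
  | zero =>
    intro pool hlen
    have hne : pool ≠ [] := by intro h; simp [h] at hlen
    rw [sorted_min_cons pool hne]
    simp [selectLoop]
  | succ n ih =>
    intro pool hlen
    have hne : pool ≠ [] := by intro h; simp [h] at hlen
    obtain ⟨m, hm⟩ : ∃ m, PySem.List.min? pool (fun x => x) = some m := by
      cases hmin : PySem.List.min? pool (fun x => x) with
      | none => exact absurd ((PySem.List.min?_eq_none_iff _ _).mp hmin) hne
      | some m => exact ⟨m, rfl⟩
    have hmem : m ∈ pool := PySem.List.min?_mem hm
    have hrem : PySem.List.remove? pool m = some (pool.erase m) :=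
      PySem.List.remove?_eq_some_erase pool m hmem
    have hlen' : n < (pool.erase m).length := by
      rw [List.length_erase_of_mem hmem]; omega
    rw [sorted_min_cons pool hne, hm]
    simp only [selectLoop, hm, Option.getD_some, hrem, List.getD_cons_succ]
    exact ih (pool.erase m) hlen'

-- the per-command values agree under Pre_'s conditions
lemma step_eq (array : List Int) (c : List Int)
    (hk1 : 1 ≤ PySem.List.pyGetD c 2 0)
    (hk2 : PySem.List.pyGetD c 2 0 ≤
      ((PySem.List.slice array (some (PySem.List.pyGetD c 0 0 - 1))
        (some (PySem.List.pyGetD c 1 0))).length : Int)) :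
    PySem.List.pyGetD
      (PySem.List.sorted (PySem.List.slice array (some (PySem.List.pyGetD c 0 0 - 1))
        (some (PySem.List.pyGetD c 1 0))) (fun x => x) false)
      (PySem.List.pyGetD c 2 0 - 1) 0 =
    selectLoop (PySem.List.slice array (some (PySem.List.pyGetD c 0 0 - 1))
        (some (PySem.List.pyGetD c 1 0))) (PySem.List.pyGetD c 2 0 - 1).toNat := by
  set k := PySem.List.pyGetD c 2 0 with hk
  set pool := PySem.List.slice array (some (PySem.List.pyGetD c 0 0 - 1))
      (some (PySem.List.pyGetD c 1 0)) with hpool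
  have hnn : (0 : Int) ≤ k - 1 := by omega
  have hcast : ((k - 1).toNat : Int) = k - 1 := Int.toNat_of_nonneg hnn
  have hlt : (k - 1).toNat < pool.length := by omega
  rw [selectLoop_eq _ _ hlt, PySem.List.pyGetD_of_nonneg _ _ hnn]

theorem solution_eq_alt (array : List Int) (commands : List (List Int))
    (hpre : Pre_solution array commands) :
    solution array commands = solution_alt array commands := by
  unfold solution solution_alt
  refine PySem.List.foldl_congr_mem _ _ _ _ (fun answer c hc => ?_)
  obtain ⟨-, hk1, hk2⟩ := hpre c hc
  simp only []
  rw [step_eq array c hk1 hk2]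

-- ===== VERDICT (by name: the statement is the Claim_ definition above) =====
theorem solution_spec : Claim_equal_solution := by
  intro array commands _ hpre
  unfold Spec_solution
  exact solution_eq_alt array commands hpre
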